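-- pv_equiv track=rewrite | github.com/pypi-data/pypi-mirror-323 | packages/osbot-playwright/osbot_playwright-0.6.10.tar.gz/osbot_playwright-0.6.10/osbot_playwright/playwright/api/Playwright_CLI.py | parse_stdout__dryrun
-- ===== SOURCE A (Python) =====
-- def parse_stdout__dryrun(stdout):
--     lines = stdout.strip().split('\n')
--     data = {}                                                                           # Dictionary to store parsed data
--     current_browser = None                                                              # Track the current browser context
--
--     for line in lines:
--         if not line.strip():                                                            # Skip empty lines
--             continue
--
--         if not line.startswith(' '):                                                    # New browser section
--             key_value = line.split(':', 1)
--             if len(key_value) == 2: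
--                 browser_info    = key_value[1].strip()                                     # Extract browser name and version
--                 parts           = browser_info.split(" version ", 1)
--                 browser_name    = parts[0].strip().lower()
--                 browser_version = parts[1].strip() if len(parts) > 1 else None
--                 if browser_name not in data:                                            # Initialize the browser entry if not already present
--                     data[browser_name] = {}
--                 if browser_version:                                                     # Add the version to the browser data
--                     data[browser_name]['version'] = browser_version
--                 current_browser = browser_name                                          # Set the current browser context
--         elif current_browser:                                                           # Add details to the current browser
--             key_value = line.split(':', 1)
--             if len(key_value) == 2:
--                 key   = key_value[0].strip().replace(' ', '_').lower()
--                 value = key_value[1].strip()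
--                 data[current_browser][key] = value
--     return data
-- ===== SOURCE B (Python) =====
-- def _is_header(line):
--     return line.strip() != '' and not line.startswith(' ') and len(line.split(':', 1)) == 2
--
-- def _split_sections(lines):
--     # group the lines into (header, body) sections; lines before the first header are dropped
--     if not lines:
--         return []
--     head, rest = lines[0], lines[1:]
--     if not _is_header(head):
--         return _split_sections(rest)
--     n = 0
--     while n < len(rest) and not _is_header(rest[n]):
--         n += 1
--     return [(head, rest[:n])] + _split_sections(rest[n:])
--
-- def _browser_name(header):
--     info = header.split(':', 1)[1].strip()
--     parts = info.split(' version ', 1)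
--     return parts[0].strip().lower()
--
-- def _apply_header(data, header):
--     info = header.split(':', 1)[1].strip()
--     parts = info.split(' version ', 1)
--     name = parts[0].strip().lower()
--     if name not in data:
--         data[name] = {}
--     if len(parts) > 1 and parts[1].strip():
--         data[name]['version'] = parts[1].strip()
--     return data
--
-- def _add_detail(data, name, line):
--     if line.strip() and line.startswith(' '):
--         kv = line.split(':', 1)
--         if len(kv) == 2:
--             data[name][kv[0].strip().replace(' ', '_').lower()] = kv[1].strip()
--     return data
--
-- def parse_stdout__dryrun(stdout):
--     data = {}
--     for header, body in _split_sections(stdout.strip().split('\n')):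
--         data = _apply_header(data, header)
--         name = _browser_name(header)
--         if name:  # an empty browser name is falsy in A: its detail lines are dropped
--             for line in body:
--                 data = _add_detail(data, name, line)
--     return data
-- ===== Notes on version B (the rewrite author's own statement) =====
-- stated objective: alternative
-- what changed: B replaces A's single loop threading a mutable current-browser state with a two-phase parse: first group the lines into (header, body) sections, then fold each section (header init/version, then its detail lines) into the dict.
import Mathlib
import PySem

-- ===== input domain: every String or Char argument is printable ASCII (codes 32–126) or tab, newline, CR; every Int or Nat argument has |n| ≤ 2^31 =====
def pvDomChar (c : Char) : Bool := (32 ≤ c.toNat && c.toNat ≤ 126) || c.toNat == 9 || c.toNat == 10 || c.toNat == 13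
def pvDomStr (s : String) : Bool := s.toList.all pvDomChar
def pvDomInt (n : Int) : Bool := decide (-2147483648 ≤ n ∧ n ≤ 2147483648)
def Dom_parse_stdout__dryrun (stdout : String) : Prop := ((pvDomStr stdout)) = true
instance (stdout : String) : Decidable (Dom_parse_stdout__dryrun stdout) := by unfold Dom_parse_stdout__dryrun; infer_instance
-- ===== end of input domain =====

-- B parses in two phases — group the lines into (header, body) sections, then fold each
-- section into the dict — instead of A's single loop threading a current-browser state;
-- objective: alternative decomposition, same cost.


-- ===== PORT A =====
-- Python truthiness of an Optional[str]: falsy when None or ""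
def pvTruthy : Option String → Bool
  | none => false
  | some s => !(s == "")

-- A's loop body: state = (data, current_browser); current_browser = none before any section
def pvStepA (st : PySem.Dict String (PySem.Dict String String) × Option String) (line : String) :
    PySem.Dict String (PySem.Dict String String) × Option String :=
  if PySem.Str.strip line == "" then st
  else if !(PySem.Str.startswith line " ") then
    let key_value := (PySem.Str.splitMax? line ":" 1).getD []
    if key_value.length == 2 then
      let browser_info := PySem.Str.strip (key_value.getD 1 "")
      let parts := (PySem.Str.splitMax? browser_info " version " 1).getD []
      let browser_name := PySem.Str.lower (PySem.Str.strip (parts.getD 0 ""))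
      let browser_version : Option String :=
        if parts.length > 1 then some (PySem.Str.strip (parts.getD 1 "")) else none
      let data := st.1
      let data := if data.contains browser_name then data
                  else data.insert browser_name PySem.Dict.empty
      -- Python: 'if browser_version:' — falsy when None or ""
      let data := if pvTruthy browser_version then
                    data.modify browser_name PySem.Dict.empty
                      (fun e => e.insert "version" (browser_version.getD ""))
                  else data
      (data, some browser_name)
    else st
  else
    match st.2 with
    | none => st
    | some current =>
      if current == "" then st  -- Python: 'elif current_browser:' — "" is falsy
      else
        let key_value := (PySem.Str.splitMax? line ":" 1).getD []
        if key_value.length == 2 then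
          let key := PySem.Str.lower (PySem.Str.replace (PySem.Str.strip (key_value.getD 0 "")) " " "_")
          let value := PySem.Str.strip (key_value.getD 1 "")
          (st.1.modify current PySem.Dict.empty (fun e => e.insert key value), st.2)
        else st

def parse_stdout__dryrun (stdout : String) : List (String × List (String × String)) :=
  let lines := (PySem.Str.split? (PySem.Str.strip stdout) "\n").getD []
  let fin := lines.foldl pvStepA (PySem.Dict.empty, none)
  fin.1.items.map (fun p => (p.1, p.2.items))

-- ===== PORT B =====
def pvIsHeader (line : String) : Bool :=
  !(PySem.Str.strip line == "") && !(PySem.Str.startswith line " ")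
    && ((PySem.Str.splitMax? line ":" 1).getD []).length == 2

-- Source B's _split_sections; its hand-written 'count n then slice' inner loop is ported as
-- takeWhile/dropWhile (the same left-to-right scan for the first header)
def pvSections : List String → List (String × List String)
  | [] => []
  | l :: ls =>
    if pvIsHeader l then
      (l, ls.takeWhile (fun x => !pvIsHeader x)) :: pvSections (ls.dropWhile (fun x => !pvIsHeader x))
    else pvSections ls
termination_by lines => lines.length
decreasing_by
  · exact Nat.lt_succ_of_le (List.length_dropWhile_le _ _)
  · simp

def pvBrowserName (header : String) : String :=
  let info := PySem.Str.strip (((PySem.Str.splitMax? header ":" 1).getD []).getD 1 "")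
  let parts := (PySem.Str.splitMax? info " version " 1).getD []
  PySem.Str.lower (PySem.Str.strip (parts.getD 0 ""))

def pvApplyHeader (data : PySem.Dict String (PySem.Dict String String)) (header : String) :
    PySem.Dict String (PySem.Dict String String) :=
  let info := PySem.Str.strip (((PySem.Str.splitMax? header ":" 1).getD []).getD 1 "")
  let parts := (PySem.Str.splitMax? info " version " 1).getD []
  let name := PySem.Str.lower (PySem.Str.strip (parts.getD 0 ""))
  let data := if data.contains name then data else data.insert name PySem.Dict.empty
  if decide (parts.length > 1) && !(PySem.Str.strip (parts.getD 1 "") == "") then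
    data.modify name PySem.Dict.empty (fun e => e.insert "version" (PySem.Str.strip (parts.getD 1 "")))
  else data

def pvAddDetail (data : PySem.Dict String (PySem.Dict String String)) (name : String) (line : String) :
    PySem.Dict String (PySem.Dict String String) :=
  if !(PySem.Str.strip line == "") && PySem.Str.startswith line " " then
    let kv := (PySem.Str.splitMax? line ":" 1).getD []
    if kv.length == 2 then
      data.modify name PySem.Dict.empty
        (fun e => e.insert (PySem.Str.lower (PySem.Str.replace (PySem.Str.strip (kv.getD 0 "")) " " "_"))
                           (PySem.Str.strip (kv.getD 1 "")))
    else data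
  else data

def pvSectionStep (data : PySem.Dict String (PySem.Dict String String)) (sec : String × List String) :
    PySem.Dict String (PySem.Dict String String) :=
  let data := pvApplyHeader data sec.1
  let name := pvBrowserName sec.1
  if name == "" then data
  else sec.2.foldl (fun d line => pvAddDetail d name line) data

def parse_stdout__dryrun_alt (stdout : String) : List (String × List (String × String)) :=
  let data := (pvSections ((PySem.Str.split? (PySem.Str.strip stdout) "\n").getD [])).foldl pvSectionStep PySem.Dict.empty
  data.items.map (fun p => (p.1, p.2.items))

-- ===== PRECONDITION & SPEC =====
def Spec_parse_stdout__dryrun (stdout : String) (out : List (String × List (String × String))) : Prop := out = parse_stdout__dryrun_alt stdout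
instance (stdout : String) (out : List (String × List (String × String))) : Decidable (Spec_parse_stdout__dryrun stdout out) := by unfold Spec_parse_stdout__dryrun; infer_instance

-- ===== CLAIM (what is proved, stated in full; the proofs are below) =====
def Claim_equal_parse_stdout__dryrun : Prop := ∀ (stdout : String), Dom_parse_stdout__dryrun stdout → Spec_parse_stdout__dryrun stdout (parse_stdout__dryrun stdout)

-- ===== LEMMAS AND PROOFS =====

-- the current-browser state is "falsy" when it is none or some ""
def pvFalsy : Option String → Bool
  | none => true
  | some s => s == ""

lemma pvStepA_skip (d : PySem.Dict String (PySem.Dict String String)) (cb : Option String)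
    (l : String) (hh : pvIsHeader l = false) (hf : pvFalsy cb = true) :
    pvStepA (d, cb) l = (d, cb) := by
  unfold pvIsHeader at hh
  unfold pvStepA
  by_cases h1 : PySem.Str.strip l == ""
  · simp [h1]
  · by_cases h2 : PySem.Str.startswith l " "
    · simp only [h1, h2]
      cases cb with
      | none => simp
      | some s =>
        simp only [pvFalsy] at hf
        simp [hf]
    · simp only [Bool.not_eq_true] at h2
      simp only [h1, h2, Bool.not_false, Bool.not_true, Bool.true_and] at hh
      simp only [h1, h2, hh]
      simp at h2
      simp [h2]

lemma pvStepA_body (d : PySem.Dict String (PySem.Dict String String)) (name l : String)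
    (hh : pvIsHeader l = false) (hn : (name == "") = false) :
    pvStepA (d, some name) l = (pvAddDetail d name l, some name) := by
  unfold pvIsHeader at hh
  unfold pvStepA pvAddDetail
  by_cases h1 : PySem.Str.strip l == ""
  · simp [h1]
  · by_cases h2 : PySem.Str.startswith l " "
    · simp only [h1, h2, Bool.not_true, if_false, Bool.not_false, Bool.true_and, Bool.and_true,
        Bool.not_eq_true, if_true, hn]
      by_cases h3 : (((PySem.Str.splitMax? l ":" 1).getD []).length == 2)
      · simp [h1, h2, h3, hn]
      · simp [h1, h2, h3, hn]
    · simp only [Bool.not_eq_true] at h2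
      simp only [h1, h2, Bool.not_false, Bool.not_true, Bool.true_and] at hh
      simp [h1, h2, hh]

lemma pvStepA_header (d : PySem.Dict String (PySem.Dict String String)) (cb : Option String)
    (l : String) (hh : pvIsHeader l = true) :
    pvStepA (d, cb) l = (pvApplyHeader d l, some (pvBrowserName l)) := by
  unfold pvIsHeader at hh
  simp only [Bool.and_eq_true, Bool.not_eq_true'] at hh
  obtain ⟨⟨h1, h2⟩, h3⟩ := hh
  unfold pvStepA pvApplyHeader pvBrowserName
  simp only [h1, h2, h3, Bool.not_false, if_true, Bool.false_eq_true, if_false]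
  by_cases h4 : ((PySem.Str.splitMax? (PySem.Str.strip (((PySem.Str.splitMax? l ":" 1).getD []).getD 1 "")) " version " 1).getD []).length > 1
  · rw [if_pos h4]
    simp only [pvTruthy, Option.getD_some, h4, decide_true, Bool.true_and]
  · rw [if_neg h4]
    simp only [pvTruthy, Bool.false_eq_true, if_false]
    have hc : (decide (((PySem.Str.splitMax? (PySem.Str.strip (((PySem.Str.splitMax? l ":" 1).getD []).getD 1 "")) " version " 1).getD []).length > 1)
        && !(PySem.Str.strip (((PySem.Str.splitMax? (PySem.Str.strip (((PySem.Str.splitMax? l ":" 1).getD []).getD 1 "")) " version " 1).getD []).getD 1 "") == "")) = false := by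
      have hd : decide (((PySem.Str.splitMax? (PySem.Str.strip (((PySem.Str.splitMax? l ":" 1).getD []).getD 1 "")) " version " 1).getD []).length > 1) = false := decide_eq_false h4
      rw [hd, Bool.false_and]
    simp only [hc, Bool.false_eq_true, if_false]

lemma pvStepA_skip_fold (body : List String) (d : PySem.Dict String (PySem.Dict String String))
    (cb : Option String) (hb : ∀ l ∈ body, pvIsHeader l = false) (hf : pvFalsy cb = true) :
    body.foldl pvStepA (d, cb) = (d, cb) := by
  induction body with
  | nil => rfl
  | cons l ls ih =>
    rw [List.foldl_cons, pvStepA_skip d cb l (hb l (by simp)) hf]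
    exact ih (fun x hx => hb x (by simp [hx]))

lemma pvStepA_body_fold (body : List String) (d : PySem.Dict String (PySem.Dict String String))
    (name : String) (hb : ∀ l ∈ body, pvIsHeader l = false) (hn : (name == "") = false) :
    body.foldl pvStepA (d, some name) = (body.foldl (fun d line => pvAddDetail d name line) d, some name) := by
  induction body generalizing d with
  | nil => rfl
  | cons l ls ih =>
    rw [List.foldl_cons, pvStepA_body d name l (hb l (by simp)) hn, List.foldl_cons]
    exact ih _ (fun x hx => hb x (by simp [hx]))

lemma pvMain : ∀ (n : Nat) (lines : List String) (d : PySem.Dict String (PySem.Dict String String))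
    (cb : Option String), lines.length ≤ n →
    (pvFalsy cb = true ∨ ∀ l ∈ lines.head?, pvIsHeader l = true) →
    (lines.foldl pvStepA (d, cb)).1 = (pvSections lines).foldl pvSectionStep d := by
  intro n
  induction n with
  | zero =>
    intro lines d cb hlen _
    have : lines = [] := List.length_eq_zero_iff.mp (Nat.le_zero.mp hlen)
    subst this; simp [pvSections]
  | succ n ih =>
    intro lines d cb hlen hcb
    cases lines with
    | nil => simp [pvSections]
    | cons l ls =>
      by_cases hh : pvIsHeader l
      · -- header line: open a section
        rw [List.foldl_cons, pvStepA_header d cb l hh]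
        have hdecomp : ls = ls.takeWhile (fun x => !pvIsHeader x) ++ ls.dropWhile (fun x => !pvIsHeader x) :=
          (List.takeWhile_append_dropWhile).symm
        have hbody : ∀ x ∈ ls.takeWhile (fun x => !pvIsHeader x), pvIsHeader x = false := by
          intro x hx
          have := List.mem_takeWhile_imp hx
          simpa using this
        have hrest : ∀ x ∈ (ls.dropWhile (fun x => !pvIsHeader x)).head?, pvIsHeader x = true := by
          intro x hx
          have := List.head?_dropWhile_not (p := fun x => !pvIsHeader x) (l := ls)
          cases hd : (ls.dropWhile (fun x => !pvIsHeader x)).head? with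
          | none => simp [hd] at hx
          | some y =>
            rw [hd] at this hx
            simp at hx; subst hx
            simpa using this
        have hlen' : (ls.dropWhile (fun x => !pvIsHeader x)).length ≤ n := by
          have h1 := List.length_dropWhile_le (p := fun x => !pvIsHeader x) (l := ls)
          simp at hlen; omega
        have hsec : pvSections (l :: ls) =
            (l, ls.takeWhile (fun x => !pvIsHeader x)) :: pvSections (ls.dropWhile (fun x => !pvIsHeader x)) := by
          rw [pvSections]; simp [hh]
        rw [hsec, List.foldl_cons]
        conv_lhs => rw [hdecomp]
        rw [List.foldl_append]
        by_cases hn : (pvBrowserName l == "")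
        · -- empty browser name: falsy context, body lines are dropped
          rw [pvStepA_skip_fold _ _ _ hbody (by simp [pvFalsy, hn])]
          rw [ih _ _ _ hlen' (Or.inr hrest)]
          have : pvSectionStep d (l, ls.takeWhile (fun x => !pvIsHeader x)) = pvApplyHeader d l := by
            unfold pvSectionStep; simp [hn]
          rw [this]
        · rw [pvStepA_body_fold _ _ _ hbody (by simpa using hn)]
          rw [ih _ _ _ hlen' (Or.inr hrest)]
          have : pvSectionStep d (l, ls.takeWhile (fun x => !pvIsHeader x)) =
              (ls.takeWhile (fun x => !pvIsHeader x)).foldl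
                (fun d line => pvAddDetail d (pvBrowserName l) line) (pvApplyHeader d l) := by
            unfold pvSectionStep; simp [hn]
          rw [this]
      · -- non-header line: a no-op in a falsy context
        have hf : pvFalsy cb = true := by
          rcases hcb with h | h
          · exact h
          · exact absurd (h l (by simp)) (by simpa using hh)
        rw [List.foldl_cons, pvStepA_skip d cb l (by simpa using hh) hf]
        have hsec : pvSections (l :: ls) = pvSections ls := by
          rw [pvSections]; simp [hh]
        rw [hsec]
        exact ih ls d cb (by simp at hlen; omega) (Or.inl hf)

-- ===== VERDICT (by name: the statement is the Claim_ definition above) =====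
theorem parse_stdout__dryrun_spec : Claim_equal_parse_stdout__dryrun := by
  intro stdout _
  unfold Spec_parse_stdout__dryrun parse_stdout__dryrun parse_stdout__dryrun_alt
  show List.map (fun p => (p.1, p.2.items))
      ((List.foldl pvStepA (PySem.Dict.empty, none) ((PySem.Str.split? (PySem.Str.strip stdout) "\n").getD [])).1.items)
    = List.map (fun p => (p.1, p.2.items))
      ((List.foldl pvSectionStep PySem.Dict.empty (pvSections ((PySem.Str.split? (PySem.Str.strip stdout) "\n").getD []))).items)
  rw [pvMain ((PySem.Str.split? (PySem.Str.strip stdout) "\n").getD []).length _ _ none le_rfl (Or.inl rfl)]
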